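-- pv_equiv track=rewrite | github.com/severin-lemaignan/dialogs | src/dialog/verbalization/utterance_rebuilding.py | delete_comma
-- ===== SOURCE A (Python) =====
-- def delete_comma(sentence):
--     """
--     This function to delete ',' if there is at the end of sentence
--     Input=sentence                                     Output=sentence
--     """
--
--     #init
--     i=0
--
--     word = sentence[len(sentence)-2]
--     if word[len(word)-1]==',':
--         word=word[:len(word)-1]
--         sentence[len(sentence)-2]=word
--
--     while i < len(sentence):
--         if sentence[i]==',':
--             sentence=sentence[:i-1]+[sentence[i-1]+',']+sentence[i+1:]
--         i=i+1
--
--     return sentence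
-- ===== SOURCE B (Python) =====
-- def delete_comma(sentence):
--     if not sentence:
--         return []
--     words = list(sentence)
--     j = len(words) - 2 if len(words) >= 2 else 0
--     if words[j].endswith(','):
--         words[j] = words[j][:-1]
--     result = []
--     i = 0
--     n = len(words)
--     while i < n:
--         if words[i] == ',' and result:
--             result[-1] += ','
--             if i + 1 < n:
--                 result.append(words[i + 1])
--             i += 2
--         else:
--             result.append(words[i])
--             i += 1
--     return result
-- ===== Notes on version B (the rewrite author's own statement) =====
-- stated objective: alternative
-- what changed: B replaces A's repeated whole-list re-slicing inside the while loop by a single forward pass that appends to a result list, emulating A's merge-into-previous-word and skip-next semantics with an index that advances by 1 or 2.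
-- intended difference: On sentences whose first token (after the preliminary trim) is a bare comma, A's negative-index wraparound re-slices the list into a longer list with duplicated words, while B leaves the unmergeable leading comma in place, which is the intended behaviour. — e.g. on delete_comma([",,"]): A returns [",,"], B returns [","]
-- outside the precondition, e.g. on delete_comma([]): A raises IndexError, B returns []; on delete_comma(['', 'x']): A raises IndexError, B returns ['', 'x']
import Mathlib
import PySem

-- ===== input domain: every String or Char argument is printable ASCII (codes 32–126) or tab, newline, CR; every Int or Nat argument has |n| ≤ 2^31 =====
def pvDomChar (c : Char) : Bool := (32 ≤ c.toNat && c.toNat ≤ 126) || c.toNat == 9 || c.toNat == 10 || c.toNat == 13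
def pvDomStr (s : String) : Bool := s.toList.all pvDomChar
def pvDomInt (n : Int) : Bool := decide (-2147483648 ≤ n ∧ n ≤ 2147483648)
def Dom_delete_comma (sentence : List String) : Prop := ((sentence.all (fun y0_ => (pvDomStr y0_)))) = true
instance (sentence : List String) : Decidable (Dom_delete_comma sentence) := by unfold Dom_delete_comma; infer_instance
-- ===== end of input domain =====

-- B builds the result in a single forward pass (emulating A's merge-and-skip semantics) instead of
-- re-slicing the whole list at every comma; A also mutates its argument in place (the trim
-- assignment) — the equivalence proved here is about the RETURN value only.

-- ===== PORT A =====
-- A's while loop over the evolving list; the fuel argument is only a totality guard: the loop runs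
-- at most (final length) ≤ 2·len−1 iterations, so the fuel delete_comma supplies is never exhausted
def delete_comma_merge_loop (fuel : Nat) (s : List String) (i : Nat) : List String :=
  match fuel with
  | 0 => s
  | fuel + 1 =>
    if i < s.length then
      if PySem.List.pyGetD s (i : Int) "" = "," then
        delete_comma_merge_loop fuel
          (PySem.List.slice s none (some ((i : Int) - 1)) ++
            [PySem.List.pyGetD s ((i : Int) - 1) "" ++ ","] ++
            PySem.List.slice s (some ((i : Int) + 1)) none)
          (i + 1)
      else
        delete_comma_merge_loop fuel s (i + 1)
    else s

def delete_comma (sentence : List String) : List String :=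
  -- word = sentence[len(sentence)-2]   (IndexError on [] — outside Pre_; the port then returns sentence)
  match PySem.List.pyGet? sentence (PySem.List.len sentence - 2) with
  | none => sentence
  | some word =>
    -- word[len(word)-1]   (IndexError on word = "" — outside Pre_)
    match PySem.Str.pyGet? word (PySem.Str.len word - 1) with
    | none => sentence
    | some c =>
      let s1 :=
        if c = ',' then
          PySem.List.pySetD sentence (PySem.List.len sentence - 2)
            (PySem.Str.slice word none (some (PySem.Str.len word - 1)))
        else sentence
      delete_comma_merge_loop (2 * s1.length + 2) s1 0

-- ===== PORT B =====
-- fuel is again only a totality guard: i grows by 1 or 2 each iteration, so s.length suffices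
def delete_comma_alt_loop (fuel : Nat) (s : List String) (res : List String) (i : Nat) : List String :=
  match fuel with
  | 0 => res
  | fuel + 1 =>
    if i < s.length then
      if s.getD i "" = "," ∧ res ≠ [] then
        delete_comma_alt_loop fuel s
          (res.dropLast ++ [res.getD (res.length - 1) "" ++ ","] ++
            (if i + 1 < s.length then [s.getD (i + 1) ""] else []))
          (i + 2)
      else
        delete_comma_alt_loop fuel s (res ++ [s.getD i ""]) (i + 1)
    else res

def delete_comma_alt (sentence : List String) : List String :=
  if sentence = [] then []
  else
    let j := if 2 ≤ sentence.length then sentence.length - 2 else 0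
    let w := sentence.getD j ""
    let words :=
      if PySem.Str.endswith w "," then sentence.set j (PySem.Str.slice w none (some (-1)))
      else sentence
    delete_comma_alt_loop words.length words [] 0

-- ===== PRECONDITION & SPEC =====
-- Pre_ excludes exactly the inputs where A raises IndexError: the empty list, and lists whose
-- second-to-last word (the last word of a one-element list, via Python's negative-index wrap) is "".
def Pre_delete_comma (sentence : List String) : Prop :=
  sentence ≠ [] ∧ sentence.getD (sentence.length - 2) "" ≠ ""
instance (sentence : List String) : Decidable (Pre_delete_comma sentence) := by
  unfold Pre_delete_comma; infer_instance
def pvWitness_delete_comma : List String := ["hello", "world,"]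

-- On sentences whose first token (after the preliminary trim) is a bare ",", A's negative-index
-- wraparound re-slices the list into a longer list with duplicated words, while B leaves the
-- unmergeable leading comma in place, which is the intended behaviour.
def D_delete_comma (sentence : List String) : Prop :=
  (3 ≤ sentence.length ∧ sentence.head? = some ",") ∨
  (1 ≤ sentence.length ∧ sentence.length ≤ 2 ∧ sentence.head? = some ",,")
instance (sentence : List String) : Decidable (D_delete_comma sentence) := by
  unfold D_delete_comma; infer_instance

def Spec_delete_comma (sentence : List String) (out : List String) : Prop :=
  ¬ D_delete_comma sentence → out = delete_comma_alt sentence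
instance (sentence : List String) (out : List String) : Decidable (Spec_delete_comma sentence out) := by
  unfold Spec_delete_comma; infer_instance

def pvDiffWitness_delete_comma : List String := [",,"]
def pvDiffWitnessOut_delete_comma : (List String) × (List String) := ([",,"], [","])

-- ===== CLAIM (what is proved, stated in full; the proofs are below) =====
def Claim_unchanged_delete_comma : Prop := ∀ (sentence : List String), Dom_delete_comma sentence → Pre_delete_comma sentence → Spec_delete_comma sentence (delete_comma sentence)
def Claim_changed_delete_comma : Prop := Dom_delete_comma (pvDiffWitness_delete_comma) ∧ Pre_delete_comma (pvDiffWitness_delete_comma) ∧ D_delete_comma (pvDiffWitness_delete_comma) ∧ delete_comma (pvDiffWitness_delete_comma) = pvDiffWitnessOut_delete_comma.1 ∧ delete_comma_alt (pvDiffWitness_delete_comma) = pvDiffWitnessOut_delete_comma.2 ∧ pvDiffWitnessOut_delete_comma.1 ≠ pvDiffWitnessOut_delete_comma.2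

-- ===== LEMMAS AND PROOFS =====

theorem merge_loop_exit (fuel : Nat) (s : List String) (i : Nat) (h : s.length ≤ i) :
    delete_comma_merge_loop fuel s i = s := by
  cases fuel with
  | zero => rfl
  | succ f => simp [delete_comma_merge_loop, Nat.not_lt.mpr h]

theorem alt_loop_exit (fuel : Nat) (s res : List String) (i : Nat) (h : s.length ≤ i) :
    delete_comma_alt_loop fuel s res i = res := by
  cases fuel with
  | zero => rfl
  | succ f => simp [delete_comma_alt_loop, Nat.not_lt.mpr h]

-- the loop invariant: A's evolving list is B's accumulated result followed by the untouched
-- suffix of the (shared) trimmed input, and A's index is the length of that result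
theorem loop_agree (s : List String) :
    ∀ (fa : Nat) (fb i : Nat) (res : List String),
      s.length - i ≤ fa → s.length - i ≤ fb → res ≠ [] →
      delete_comma_merge_loop fa (res ++ s.drop i) res.length
        = delete_comma_alt_loop fb s res i := by
  intro fa
  induction fa with
  | zero =>
    intro fb i res ha _ hres
    have hi : s.length ≤ i := by omega
    rw [merge_loop_exit _ _ _ (by simp [List.drop_eq_nil_of_le hi]),
        alt_loop_exit _ _ _ _ hi]
    simp [List.drop_eq_nil_of_le hi]
  | succ fa ih =>
    intro fb i res ha hb hres
    by_cases hi : i < s.length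
    · -- one real iteration on each side
      have hdrop : s.drop i = s[i] :: s.drop (i + 1) := List.drop_eq_getElem_cons hi
      obtain ⟨fb', rfl⟩ : ∃ f, fb = f + 1 := ⟨fb - 1, by omega⟩
      have hguard : res.length < (res ++ s.drop i).length := by
        rw [hdrop]; simp
        omega
      have hc1 : PySem.List.pyGetD (res ++ s.drop i) (res.length : Int) "" = s[i] := by
        rw [PySem.List.pyGetD_natCast, hdrop]
        simp [List.getD, List.getElem?_append_right (Nat.le_refl _), List.getElem?_eq_getElem hi]
      have hlres : 1 ≤ res.length := by
        cases res with | nil => exact absurd rfl hres | cons a l => simp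
      rw [delete_comma_merge_loop, delete_comma_alt_loop]
      simp only [if_pos hguard, if_pos hi, hc1, List.getD_eq_getElem _ _ hi, hres,
        ne_eq, not_false_eq_true, and_true]
      by_cases hcomma : s[i] = ","
      · -- merge step
        simp only [if_pos hcomma]
        have hc3 : PySem.List.slice (res ++ s.drop i) none (some ((res.length : Int) - 1))
            = res.dropLast := by
          have : ((res.length : Int) - 1) = ((res.length - 1 : Nat) : Int) := by omega
          rw [this, PySem.List.slice_to_natCast, List.take_append_of_le_length (by omega),
            List.dropLast_eq_take]
        have hc2 : PySem.List.pyGetD (res ++ s.drop i) ((res.length : Int) - 1) ""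
            = res.getD (res.length - 1) "" := by
          have : ((res.length : Int) - 1) = ((res.length - 1 : Nat) : Int) := by omega
          rw [this, PySem.List.pyGetD_natCast]
          simp [List.getD, List.getElem?_append_left (by omega : res.length - 1 < res.length)]
        have hc4 : PySem.List.slice (res ++ s.drop i) (some ((res.length : Int) + 1)) none
            = s.drop (i + 1) := by
          have : ((res.length : Int) + 1) = ((res.length + 1 : Nat) : Int) := by omega
          rw [this, PySem.List.slice_from_natCast, List.drop_append, hdrop]
          simp
        rw [hc3, hc2, hc4]
        by_cases hi2 : i + 1 < s.length
        · have hdrop2 : s.drop (i + 1) = s[i+1] :: s.drop (i + 2) :=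
            List.drop_eq_getElem_cons hi2
          have hgetD2 : s.getD (i + 1) "" = s[i+1] := List.getD_eq_getElem _ _ hi2
          simp only [if_pos hi2, hgetD2]
          have hres' : res.dropLast ++ [res.getD (res.length - 1) "" ++ ","] ++ [s[i+1]] ≠ [] := by
            simp
          have hlen' : (res.dropLast ++ [res.getD (res.length - 1) "" ++ ","] ++ [s[i+1]]).length
              = res.length + 1 := by
            simp; omega
          have := ih fb' (i + 2)
            (res.dropLast ++ [res.getD (res.length - 1) "" ++ ","] ++ [s[i+1]])
            (by omega) (by omega) hres'
          rw [hlen'] at this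
          rw [← this, hdrop2]
          simp
        · -- the merged element absorbs the last remaining word: both loops exit next
          have hdrop2 : s.drop (i + 1) = [] := List.drop_eq_nil_of_le (by omega)
          simp only [if_neg hi2, hdrop2, List.append_nil]
          rw [merge_loop_exit _ _ _ (by
                simp only [List.length_append, List.length_dropLast, List.length_cons,
                  List.length_nil]
                omega),
              alt_loop_exit _ _ _ _ (by omega)]
      · -- plain step: the word is kept
        simp only [if_neg hcomma]
        have := ih fb' (i + 1) (res ++ [s[i]]) (by omega) (by omega) (by simp)
        simp only [List.length_append, List.length_cons, List.length_nil] at this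
        rw [← this, hdrop]
        simp
    · have hle : s.length ≤ i := by omega
      rw [merge_loop_exit _ _ _ (by simp [List.drop_eq_nil_of_le hle]),
          alt_loop_exit _ _ _ _ hle]
      simp [List.drop_eq_nil_of_le hle]

theorem pv_suffix_singleton (l : List Char) (a : Char) : ([a] <:+ l) ↔ l.getLast? = some a := by
  constructor
  · rintro ⟨p, rfl⟩; simp
  · intro h
    have hne : l ≠ [] := by rintro rfl; simp at h
    refine ⟨l.dropLast, ?_⟩
    rw [List.getLast?_eq_some_getLast hne] at h
    rw [← Option.some_inj.mp h] at *
    exact List.dropLast_append_getLast hne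

theorem pv_endswith_last (w : String) :
    PySem.Str.endswith w "," = true ↔ w.toList.getLast? = some ',' := by
  rw [show PySem.Str.endswith w "," = PySem.Chars.endswith w.toList [','] from by simp]
  rw [PySem.Chars.endswith_iff, pv_suffix_singleton]

theorem pv_slice_dropLast (cs : List Char) (h : cs ≠ []) :
    PySem.List.slice cs none (some ((cs.length : Int) - 1)) = cs.dropLast := by
  have h2 : ((cs.length : Int) - 1) = ((cs.length - 1 : Nat) : Int) := by
    have : 0 < cs.length := List.length_pos_of_ne_nil h; omega
  rw [h2, PySem.List.slice_to_natCast, ← List.dropLast_eq_take]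

-- A's word[:len(word)-1] and B's word[:-1] are the same string for a nonempty word
theorem pv_slice_last (w : String) (h : w.toList ≠ []) :
    PySem.Str.slice w none (some (PySem.Str.len w - 1))
      = PySem.Str.slice w none (some (-1)) := by
  have h1 : (PySem.Str.len w - 1 : Int) = ((w.toList.length : Int) - 1) := by simp
  simp only [PySem.Str.slice, h1]
  congr 1
  simp only [PySem.Chars.slice_eq_listSlice]
  rw [pv_slice_dropLast _ h, PySem.List.slice_to_neg_one]

theorem pv_head?_getD (l : List String) (h : l ≠ []) : l.head? = some (l.getD 0 "") := by
  cases l with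
  | nil => exact absurd rfl h
  | cons a t => simp

-- both loops started on the same trimmed list agree, provided its first word is not ","
theorem pv_final (t : List String) (ht : t ≠ []) (h0 : t.getD 0 "" ≠ ",") :
    delete_comma_merge_loop (2 * t.length + 2) t 0
      = delete_comma_alt_loop t.length t [] 0 := by
  cases t with
  | nil => exact absurd rfl ht
  | cons a t' =>
    have hl : 0 < (a :: t').length := by simp
    have h0' : a ≠ "," := by simpa using h0
    rw [show 2 * (a :: t').length + 2 = (2 * (a :: t').length + 1) + 1 from rfl,
        delete_comma_merge_loop]
    simp only [if_pos hl, PySem.List.pyGetD_natCast, List.getD_cons_zero]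
    rw [if_neg h0']
    rw [show (a :: t').length = t'.length + 1 from rfl, delete_comma_alt_loop]
    simp only [if_pos hl]
    rw [if_neg (by simp)]
    have := loop_agree (a :: t') (2 * (a :: t').length + 1) t'.length 1 [a]
      (by simp; omega) (by simp) (by simp)
    simpa using this

theorem delete_comma_spec : Claim_unchanged_delete_comma := by
  intro s _ hpre hnD
  obtain ⟨hne, hw⟩ := hpre
  have hnD1 : 3 ≤ s.length → s.head? ≠ some "," := fun h3 hh => hnD (Or.inl ⟨h3, hh⟩)
  have hnD2 : 1 ≤ s.length → s.length ≤ 2 → s.head? ≠ some ",," :=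
    fun ha hb hh => hnD (Or.inr ⟨ha, hb, hh⟩)
  have hn1 : 0 < s.length := List.length_pos_of_ne_nil hne
  show delete_comma s = delete_comma_alt s
  set j := s.length - 2 with hj
  have hjlt : j < s.length := by omega
  have hw0 : s.getD j "" = s[j] := List.getD_eq_getElem _ _ hjlt
  have hwne : s[j] ≠ "" := by rw [← hw0]; exact hw
  have hcs : (s[j]).toList ≠ [] := by simpa using hwne
  have hcpos : 0 < s[j].toList.length := List.length_pos_of_ne_nil hcs
  -- A's two indexings return the word and its last character
  have hcast : (PySem.List.len s - 2 : Int) = if 2 ≤ s.length then ((j : Nat) : Int) else -1 := by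
    simp only [PySem.List.len_eq]; split <;> omega
  have h1 : PySem.List.pyGet? s (PySem.List.len s - 2) = some s[j] := by
    rw [hcast]
    by_cases hn2 : 2 ≤ s.length
    · rw [if_pos hn2, PySem.List.pyGet?_natCast, List.getElem?_eq_getElem hjlt]
    · rw [if_neg hn2, PySem.List.pyGet?_neg_one, List.getLast?_eq_some_getLast hne]
      congr 1
      rw [List.getLast_eq_getElem]
      congr 1
      omega
  have hcast2 : (PySem.Str.len s[j] - 1 : Int) = ((s[j].toList.length - 1 : Nat) : Int) := by
    rw [show PySem.Str.len s[j] = (s[j].toList.length : Int) from by simp]; omega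
  have h2 : PySem.Str.pyGet? s[j] (PySem.Str.len s[j] - 1) = some (s[j].toList.getLast hcs) := by
    rw [hcast2, PySem.Str.pyGet?_natCast,
      List.getElem?_eq_getElem (by omega : s[j].toList.length - 1 < s[j].toList.length),
      List.getLast_eq_getElem]
  have hciff : (s[j].toList.getLast hcs = ',') ↔ (PySem.Str.endswith s[j] "," = true) := by
    rw [pv_endswith_last, List.getLast?_eq_some_getLast hcs]
    exact ⟨fun h => by rw [h], fun h => Option.some_inj.mp h⟩
  -- Python's assignment sentence[len(sentence)-2] = v writes the word back at (Nat) index j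
  have hset : ∀ v : String,
      PySem.List.pySetD s (PySem.List.len s - 2) v = s.set j v := by
    intro v
    rw [hcast]
    by_cases hn2 : 2 ≤ s.length
    · rw [if_pos hn2, PySem.List.pySetD_natCast]
    · rw [if_neg hn2]
      obtain ⟨a, rfl⟩ : ∃ a, s = [a] := by
        cases s with
        | nil => exact absurd rfl hne
        | cons a t =>
          cases t with
          | nil => exact ⟨a, rfl⟩
          | cons b t' => simp at hn2
      have : j = 0 := by omega
      rw [this]
      simp [PySem.List.pySetD, PySem.List.pySet?, PySem.List.pyIdx?]
  -- reduce A to the merge loop on the trimmed list, and B to its loop on the same list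
  simp only [delete_comma, h1, h2, hset, pv_slice_last _ hcs]
  rw [delete_comma_alt, if_neg hne]
  simp only [show (if 2 ≤ s.length then s.length - 2 else 0) = j from by split <;> omega, hw0]
  by_cases hc : s[j].toList.getLast hcs = ','
  · -- the trim fires on both sides, producing the same list
    rw [if_pos hc, if_pos (hciff.mp hc)]
    set v := PySem.Str.slice s[j] none (some (-1)) with hv
    apply pv_final
    · intro h
      have hlen0 : s = [] := by simpa using congrArg List.length h
      exact hne hlen0
    · -- (s.set j v).getD 0 ≠ ","
      by_cases h3 : 3 ≤ s.length
      · have hj1 : j ≠ 0 := by omega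
        rw [show (s.set j v).getD 0 "" = s.getD 0 "" from by
          simp [List.getD, List.getElem?_set_ne (by omega : j ≠ 0)]]
        intro hcon
        exact hnD1 h3 (by rw [pv_head?_getD s hne, hcon])
      · have hj0 : j = 0 := by omega
        rw [hj0, show (s.set 0 v).getD 0 "" = v from by
          simp [List.getD, hn1]]
        intro hcon
        -- v = "," forces the original word to be ",,", which D_ excludes
        have hvl : v.toList = s[j].toList.dropLast := PySem.Str.slice_to_neg_one s[j]
        have hdl : s[j].toList.dropLast = [','] := by
          rw [← hvl, hcon]; decide
        have hw2 : s[j].toList = [',', ','] := by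
          conv_lhs => rw [← List.dropLast_append_getLast hcs]
          rw [hdl, hc]
          rfl
        have hws : s[j] = ",," := by
          have := congrArg String.ofList hw2; simpa using this
        have : s.head? = some ",," := by
          rw [pv_head?_getD s hne, ← hj0, hw0, hws]
        exact hnD2 (by omega) (by omega) this
  · -- no trim: both sides run on s itself
    rw [if_neg hc, if_neg (fun h => hc (hciff.mpr h))]
    apply pv_final s hne
    intro hcon
    by_cases h3 : 3 ≤ s.length
    · exact hnD1 h3 (by rw [pv_head?_getD s hne, hcon])
    · have hj0 : j = 0 := by omega
      have : s[j] = "," := by rw [← hw0, hj0]; exact hcon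
      apply hc
      apply Option.some_inj.mp
      rw [← List.getLast?_eq_some_getLast hcs, this]
      decide

theorem delete_comma_changed : Claim_changed_delete_comma := by
  unfold Claim_changed_delete_comma; decide
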